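-- pv_equiv track=rewrite | github.com/JOO-10000-Zi/Baekjoon | 프로그래머스/lv0/120864. 숨어있는 숫자의 덧셈 （2）/숨어있는 숫자의 덧셈 （2）.py | solution
-- ===== SOURCE A (Python) =====
-- def solution(my_string):
--     answer = 0
--     for i in my_string:
--         if i.isdigit() != True:
--             my_string = my_string.replace(i, ",")
--
--     a = list(map(str, my_string.split(",")))
--     for i in a:
--         if i.isdigit() :
--             answer += int(i)
--
--     return answer
-- ===== SOURCE B (Python) =====
-- def solution(my_string):
--     total = 0
--     cur = 0
--     for ch in my_string:
--         if '0' <= ch <= '9':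
--             cur = cur * 10 + (ord(ch) - 48)
--         else:
--             total += cur
--             cur = 0
--     return total + cur
-- ===== Notes on version B (the rewrite author's own statement) =====
-- stated objective: faster
-- what changed: B replaces A's repeated full-string replace() per character plus split/int re-parsing by a single linear scan that accumulates each maximal digit run with Horner's rule.
import Mathlib
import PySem

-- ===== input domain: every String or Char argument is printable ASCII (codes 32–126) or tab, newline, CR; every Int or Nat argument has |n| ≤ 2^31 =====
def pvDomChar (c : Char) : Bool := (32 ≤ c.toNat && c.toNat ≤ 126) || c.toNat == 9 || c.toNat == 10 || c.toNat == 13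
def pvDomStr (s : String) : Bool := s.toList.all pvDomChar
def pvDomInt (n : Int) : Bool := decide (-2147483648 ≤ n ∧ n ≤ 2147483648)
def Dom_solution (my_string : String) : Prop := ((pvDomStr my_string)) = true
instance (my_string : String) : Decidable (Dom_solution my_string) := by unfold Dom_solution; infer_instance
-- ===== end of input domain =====

-- B replaces A's per-character full-string replace() plus split/int re-parsing by one
-- linear scan accumulating each maximal digit run with Horner's rule; the theorem proves
-- the two ports return the same value on every printable-ASCII input.


-- ===== PORT A =====
-- literal port of A: the first loop runs over the ORIGINAL characters, replacing every
-- occurrence of each non-digit character by "," in the current string; then split on ","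
-- and sum int(i) over the digit chunks.  int(i) is guarded by i.isdigit(), so
-- PySem.Int.ofChars? is `some` there and the `.getD 0` default is never taken.
def solution (my_string : String) : Int :=
  let s1 := my_string.toList.foldl
      (fun ms i => if (PySem.Chars.isdigit i != true) then PySem.Chars.replace ms [i] [','] else ms)
      my_string.toList
  let a := PySem.Chars.splitOn s1 [',']
  a.foldl (fun answer i =>
      if PySem.Chars.strIsdigit i then answer + (PySem.Int.ofChars? i).getD 0 else answer) 0

-- ===== PORT B =====
-- literal port of B: one pass, (total, cur) accumulator, Horner step on digits.
def solution_alt (my_string : String) : Int :=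
  let p : Int × Int := my_string.toList.foldl
      (fun acc ch =>
        if '0' ≤ ch ∧ ch ≤ '9' then (acc.1, acc.2 * 10 + ((ch.toNat : Int) - 48))
        else (acc.1 + acc.2, 0))
      (0, 0)
  p.1 + p.2

-- ===== PRECONDITION & SPEC =====
def Spec_solution (my_string : String) (out : Int) : Prop := out = solution_alt my_string
instance (my_string : String) (out : Int) : Decidable (Spec_solution my_string out) := by unfold Spec_solution; infer_instance

-- ===== CLAIM (what is proved, stated in full; the proofs are below) =====
def Claim_equal_solution : Prop := ∀ (my_string : String), Dom_solution my_string → Spec_solution my_string (solution my_string)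

-- ===== LEMMAS AND PROOFS =====

-- ---- proof-side clone of PySem's private int-parsing helpers (used only in proofs) ----
def myGo : List Char → Bool → Nat → Option Nat
  | [], afterDigit, acc => if afterDigit = true then some acc else none
  | c :: rest, afterDigit, acc =>
    if c.isDigit = true then myGo rest true (acc * 10 + (c.toNat - '0'.toNat))
    else
      if c = '_' ∧ afterDigit = true then
        match rest with
        | d :: _ => if d.isDigit = true then myGo rest false acc else none
        | [] => none
      else none

def myDigitsVal? : List Char → Option Nat
  | [] => none
  | cs => myGo cs false 0

def myOfChars? (s : List Char) : Option Int :=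
  have cs := (List.dropWhile PySem.Int.isIntSpace (List.dropWhile PySem.Int.isIntSpace s).reverse).reverse
  match cs with
  | '-' :: ds => Option.map (fun n => -n) (do let a ← myDigitsVal? ds; pure ((a : Nat) : Int))
  | '+' :: ds => Option.map (fun n => n) (do let a ← myDigitsVal? ds; pure ((a : Nat) : Int))
  | ds => Option.map (fun n => n) (do let a ← myDigitsVal? ds; pure ((a : Nat) : Int))

-- any function satisfying the defining equations of PySem's private digit parser is myGo
lemma goSpec_unique (g : List Char → Bool → Nat → Option Nat)
    (h1 : ∀ b acc, g [] b acc = if b = true then some acc else none)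
    (h2 : ∀ c rest b acc, g (c :: rest) b acc =
      if c.isDigit = true then g rest true (acc * 10 + (c.toNat - '0'.toNat))
      else
        if c = '_' ∧ b = true then
          (match rest with
           | d :: _ => if d.isDigit = true then g rest false acc else none
           | [] => none)
        else none) :
    ∀ l b acc, g l b acc = myGo l b acc := by
  intro l
  induction l with
  | nil => intro b acc; rw [h1]; rfl
  | cons c rest ih =>
    intro b acc
    rw [h2]
    simp only [ih]
    by_cases hd : c.isDigit = true
    · simp [myGo, hd]
    · simp only [hd, Bool.false_eq_true, if_false]
      cases rest with
      | nil => simp [myGo, hd]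
      | cons d tl =>
        by_cases hu : c = '_' ∧ b = true
        · simp [myGo, hu]
        · simp [myGo, hd, hu]

lemma digitsValGo_eq (a : Char) (s : List Char) (g : List Char → Bool → Nat → Option Nat)
    (hg : ∀ l b acc, g l b acc = myGo l b acc) :
    (if a.isDigit = true then g s true (0 * 10 + (a.toNat - '0'.toNat))
     else
       if a = '_' ∧ false = true then
         (match s with
          | d :: _ => if d.isDigit = true then g s false 0 else none
          | [] => none)
       else none)
    = myDigitsVal? (a :: s) := by
  rw [show myDigitsVal? (a :: s)
      = (if a.isDigit = true then myGo s true (0 * 10 + (a.toNat - '0'.toNat))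
         else
           if a = '_' ∧ false = true then
             (match s with
              | d :: _ => if d.isDigit = true then myGo s false 0 else none
              | [] => none)
           else none) from rfl]
  simp only [hg]

lemma ofChars?_eq_my (cs : List Char) : PySem.Int.ofChars? cs = myOfChars? cs := by
  unfold PySem.Int.ofChars? myOfChars?
  generalize (List.dropWhile PySem.Int.isIntSpace (List.dropWhile PySem.Int.isIntSpace cs).reverse).reverse = ds
  cases ds with
  | nil => rfl
  | cons c t =>
    dsimp only
    split
    · rename_i ds heq; cases heq
      congr 1
      congr 1
      cases t with
      | nil => rfl
      | cons a s =>
        conv_lhs => whnf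
        exact digitsValGo_eq a s _ (goSpec_unique _ (fun _ _ => rfl) (fun _ _ _ _ => rfl))
    · rename_i ds heq; cases heq
      congr 1
      congr 1
      cases t with
      | nil => rfl
      | cons a s =>
        conv_lhs => whnf
        exact digitsValGo_eq a s _ (goSpec_unique _ (fun _ _ => rfl) (fun _ _ _ _ => rfl))
    · split
      · rename_i ds heq; simp_all
      · rename_i ds heq; simp_all
      · congr 1
        congr 1
        conv_lhs => whnf
        exact digitsValGo_eq c t _ (goSpec_unique _ (fun _ _ => rfl) (fun _ _ _ _ => rfl))

-- ---- digit characters ----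
lemma isdigit_eq_isDigit (c : Char) : PySem.Chars.isdigit c = c.isDigit := by
  rfl

lemma isIntSpace_of_digit {c : Char} (h : PySem.Chars.isdigit c = true) :
    PySem.Int.isIntSpace c = false := by
  simp only [PySem.Chars.isdigit, Bool.and_eq_true, decide_eq_true_eq, Char.le_def] at h
  simp only [PySem.Int.isIntSpace, Bool.or_eq_false_iff, decide_eq_false_iff_not]
  have h0 : ('0' : Char).toNat = 48 := by decide
  have h9 : ('9' : Char).toNat = 57 := by decide
  refine ⟨⟨⟨⟨⟨?_, ?_⟩, ?_⟩, ?_⟩, ?_⟩, ?_⟩ <;>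
    (rintro rfl; revert h; decide)

lemma digit_toNat_ge {c : Char} (h : PySem.Chars.isdigit c = true) : 48 ≤ c.toNat := by
  simp only [PySem.Chars.isdigit, Bool.and_eq_true, decide_eq_true_eq, Char.le_def] at h
  exact h.1

lemma digit_ne_comma {c : Char} (h : PySem.Chars.isdigit c = true) : c ≠ ',' := by
  rintro rfl; revert h; decide

-- ---- value of a digit run ----
-- B-side one-pass scan, specification form
def scanS : List Char → Int → Int
  | [], cur => cur
  | c :: t, cur =>
    if PySem.Chars.isdigit c then scanS t (cur * 10 + ((c.toNat : Int) - 48)) else cur + scanS t 0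

def hornerI (l : List Char) : Int := l.foldl (fun a c => a * 10 + ((c.toNat : Int) - 48)) 0

lemma myGo_digits : ∀ (l : List Char) (acc : Nat), (∀ c ∈ l, PySem.Chars.isdigit c = true) →
    myGo l true acc = some (l.foldl (fun a c => a * 10 + (c.toNat - '0'.toNat)) acc) := by
  intro l
  induction l with
  | nil => intro acc _; simp [myGo]
  | cons c t ih =>
    intro acc h
    have hc : c.isDigit = true := by
      rw [← isdigit_eq_isDigit]; exact h c (List.mem_cons_self ..)
    simp only [myGo, hc, if_true, List.foldl_cons]
    exact ih _ (fun x hx => h x (List.mem_cons_of_mem _ hx))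

lemma hornerN_cast : ∀ (l : List Char) (acc : Nat), (∀ c ∈ l, PySem.Chars.isdigit c = true) →
    ((l.foldl (fun a c => a * 10 + (c.toNat - '0'.toNat)) acc : Nat) : Int)
      = l.foldl (fun a c => a * 10 + ((c.toNat : Int) - 48)) (acc : Int) := by
  intro l
  induction l with
  | nil => intro acc _; simp
  | cons c t ih =>
    intro acc h
    have hc := digit_toNat_ge (h c (List.mem_cons_self ..))
    simp only [List.foldl_cons]
    rw [ih _ (fun x hx => h x (List.mem_cons_of_mem _ hx))]
    congr 1
    have h0 : ('0' : Char).toNat = 48 := rfl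
    rw [h0]
    push_cast [Nat.cast_sub hc]
    ring

lemma dropWhile_digits (m : List Char) (h : ∀ c ∈ m, PySem.Chars.isdigit c = true) :
    List.dropWhile PySem.Int.isIntSpace m = m := by
  cases m with
  | nil => rfl
  | cons c t =>
    rw [List.dropWhile_cons_of_neg]
    simp [isIntSpace_of_digit (h c (List.mem_cons_self ..))]

lemma ofChars?_digits (l : List Char) (hne : l ≠ []) (h : ∀ c ∈ l, PySem.Chars.isdigit c = true) :
    PySem.Int.ofChars? l = some (hornerI l) := by
  rw [ofChars?_eq_my]
  unfold myOfChars?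
  rw [dropWhile_digits l h,
      dropWhile_digits l.reverse (fun c hc => h c (List.mem_reverse.mp hc)),
      List.reverse_reverse]
  obtain ⟨c, t, rfl⟩ : ∃ c t, l = c :: t := by
    cases l with
    | nil => exact absurd rfl hne
    | cons c t => exact ⟨c, t, rfl⟩
  have hc : PySem.Chars.isdigit c = true := h c (List.mem_cons_self ..)
  have hcd : c.isDigit = true := by rw [← isdigit_eq_isDigit]; exact hc
  dsimp only
  split
  · rename_i ds heq; cases heq
    exact absurd hc (by decide)
  · rename_i ds heq; cases heq
    exact absurd hc (by decide)
  · show Option.map _ (myDigitsVal? (c :: t) >>= _) = _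
    have : myDigitsVal? (c :: t) = myGo t true (0 * 10 + (c.toNat - '0'.toNat)) := by
      simp [myDigitsVal?, myGo, hcd]
    rw [this, myGo_digits t _ (fun x hx => h x (List.mem_cons_of_mem _ hx))]
    simp only [Option.bind_eq_bind, Option.pure_def, Option.bind_some, Option.map_some]
    rw [hornerN_cast t _ (fun x hx => h x (List.mem_cons_of_mem _ hx))]
    have h0 : ('0' : Char).toNat = 48 := rfl
    have hge := digit_toNat_ge hc
    simp only [hornerI, List.foldl_cons]
    congr 1
    rw [h0]
    push_cast [Nat.cast_sub hge]
    ring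

-- ---- replace by a single character = pointwise map ----
lemma replace_go_single (i : Char) : ∀ (fuel : Nat) (l acc : List Char), l.length ≤ fuel →
    PySem.Chars.replace.go [i] [','] fuel l acc
      = acc.reverse ++ l.map (fun c => if c = i then ',' else c) := by
  intro fuel
  induction fuel with
  | zero =>
    intro l acc h
    have hl : l = [] := List.eq_nil_of_length_eq_zero (Nat.le_zero.mp h)
    subst hl
    simp [PySem.Chars.replace.go]
  | succ n ih =>
    intro l acc h
    cases l with
    | nil => simp [PySem.Chars.replace.go]
    | cons c t =>
      rw [PySem.Chars.replace.go]
      by_cases hic : i = c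
      · subst hic
        simp only [List.isPrefixOf, BEq.rfl, Bool.true_and, if_true]
        rw [ih _ _ (by simpa using Nat.le_of_succ_le_succ h)]
        simp
      · have hpre : List.isPrefixOf [i] (c :: t) = false := by
          simp [List.isPrefixOf, hic]
        rw [hpre]
        simp only [Bool.false_eq_true, if_false]
        rw [ih _ _ (by simpa using Nat.le_of_succ_le_succ h)]
        simp [Ne.symm hic]

lemma replace_single (l : List Char) (i : Char) :
    PySem.Chars.replace l [i] [','] = l.map (fun c => if c = i then ',' else c) := by
  rw [PySem.Chars.replace]
  simp only [List.isEmpty_cons, Bool.false_eq_true, if_false]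
  simpa using replace_go_single i l.length l [] le_rfl

-- ---- A's first loop turns every non-digit character into ',' ----
def mapComma (l : List Char) : List Char :=
  l.map (fun c => if PySem.Chars.isdigit c then c else ',')

lemma loop1_inv : ∀ (todo orig : List Char) (f : Char → Char),
    (∀ c, PySem.Chars.isdigit c = true → f c = c) → (∀ c, f c = c ∨ f c = ',') →
    todo.foldl
      (fun ms i => if (PySem.Chars.isdigit i != true) then PySem.Chars.replace ms [i] [','] else ms)
      (orig.map f)
    = orig.map (fun c =>
        if f c = ',' ∨ (PySem.Chars.isdigit c = false ∧ c ∈ todo) then ',' else f c) := by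
  intro todo
  induction todo with
  | nil =>
    intro orig f h1 h2
    simp only [List.foldl_nil, List.not_mem_nil, and_false, or_false]
    refine List.map_congr_left ?_ |>.symm
    intro c _
    rcases h2 c with hc | hc
    · rw [hc]
      by_cases hcc : c = ',' <;> simp [hcc]
    · simp [hc]
  | cons i t ih =>
    intro orig f h1 h2
    simp only [List.foldl_cons]
    by_cases hdi : PySem.Chars.isdigit i = true
    · rw [show (if (PySem.Chars.isdigit i != true)
          then PySem.Chars.replace (orig.map f) [i] [','] else orig.map f) = orig.map f by
        simp [hdi]]
      rw [ih orig f h1 h2]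
      refine List.map_congr_left ?_
      intro c _
      by_cases hdc : PySem.Chars.isdigit c = false
      · have hci : c ≠ i := fun hh => by rw [hh] at hdc; rw [hdi] at hdc; cases hdc
        simp [List.mem_cons, hci]
      · simp [hdc]
    · rw [show (if (PySem.Chars.isdigit i != true)
          then PySem.Chars.replace (orig.map f) [i] [','] else orig.map f)
          = PySem.Chars.replace (orig.map f) [i] [','] by simp [hdi]]
      rw [replace_single, List.map_map,
        show ((fun c => if c = i then ',' else c) ∘ f) = (fun c => if f c = i then ',' else f c)
          from rfl]
      rw [ih orig _ (fun c hc => by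
            rw [h1 c hc]
            have hci : c ≠ i := fun hh => by rw [← hh] at hdi; exact hdi hc
            simp [hci])
          (fun c => by
            by_cases hfi : f c = i
            · simp [hfi]
            · simpa [hfi] using h2 c)]
      refine List.map_congr_left ?_
      intro c _
      have hdi' : PySem.Chars.isdigit i = false := by
        cases hh : PySem.Chars.isdigit i
        · rfl
        · exact absurd hh hdi
      rcases h2 c with hc | hc
      · rw [hc]
        by_cases hci : c = i
        · subst hci
          simp [hdi', List.mem_cons]
        · by_cases hcc : c = ','
          · simp [hcc]
          · simp [hcc, hci, List.mem_cons]
      · rw [hc]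
        have : (if (',' : Char) = i then ',' else ',') = ',' := by split <;> rfl
        rw [this]
        simp

lemma loop1 (l : List Char) :
    l.foldl
      (fun ms i => if (PySem.Chars.isdigit i != true) then PySem.Chars.replace ms [i] [','] else ms)
      l = mapComma l := by
  have h := loop1_inv l l id (fun _ _ => rfl) (fun _ => Or.inl rfl)
  rw [List.map_id] at h
  rw [h]
  refine List.map_congr_left ?_
  intro c hc
  by_cases hd : PySem.Chars.isdigit c = true
  · simp [hd, digit_ne_comma hd]
  · have hd' : PySem.Chars.isdigit c = false := by
      cases hh : PySem.Chars.isdigit c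
      · rfl
      · exact absurd hh hd
    simp [hd', hc]

-- ---- splitting on ',' ----
def glueC : List Char → List (List Char) → List (List Char)
  | pre, [] => [pre]
  | pre, h :: t => (pre ++ h) :: t

def splitC : List Char → List (List Char)
  | [] => [[]]
  | c :: t => if c = ',' then [] :: splitC t else glueC [c] (splitC t)

lemma splitC_cons_exists (l : List Char) : ∃ h t, splitC l = h :: t := by
  cases l with
  | nil => exact ⟨[], [], rfl⟩
  | cons c t =>
    simp only [splitC]
    split
    · exact ⟨[], splitC t, rfl⟩
    · obtain ⟨h', t', ht⟩ := splitC_cons_exists t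
      exact ⟨c :: h', t', by simp [ht, glueC]⟩

lemma glueC_nil (ls : List (List Char)) (h : ls ≠ []) : glueC [] ls = ls := by
  cases ls with
  | nil => exact absurd rfl h
  | cons a t => simp [glueC]

lemma glueC_glueC (pre c ls) : glueC pre (glueC c ls) = glueC (pre ++ c) ls := by
  cases ls <;> simp [glueC]

lemma splitOn_go_comma : ∀ (fuel : Nat) (l cur : List Char) (acc : List (List Char)),
    l.length ≤ fuel →
    PySem.Chars.splitOn.go [','] fuel l cur acc
      = acc.reverse ++ glueC cur.reverse (splitC l) := by
  intro fuel
  induction fuel with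
  | zero =>
    intro l cur acc h
    have hl : l = [] := List.eq_nil_of_length_eq_zero (Nat.le_zero.mp h)
    subst hl
    simp [PySem.Chars.splitOn.go, splitC, glueC]
  | succ n ih =>
    intro l cur acc h
    cases l with
    | nil => simp [PySem.Chars.splitOn.go, splitC, glueC]
    | cons c t =>
      rw [PySem.Chars.splitOn.go]
      by_cases hc : c = ','
      · subst hc
        simp only [List.isPrefixOf, BEq.rfl, Bool.true_and, if_true]
        rw [ih _ _ _ (by simpa using Nat.le_of_succ_le_succ h)]
        simp only [List.reverse_nil, List.drop_succ_cons, List.drop_zero, List.length_cons,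
          List.length_nil]
        rw [glueC_nil _ (by obtain ⟨h', t', ht⟩ := splitC_cons_exists t; simp [ht])]
        simp [splitC, glueC]
      · have hpre : List.isPrefixOf [','] (c :: t) = false := by
          simp [List.isPrefixOf]; exact fun hh => absurd hh.symm hc
        rw [hpre]
        simp only [Bool.false_eq_true, if_false]
        rw [ih _ _ _ (by simpa using Nat.le_of_succ_le_succ h)]
        simp only [splitC, hc, if_false, List.reverse_cons]
        rw [glueC_glueC]

lemma splitOn_comma (l : List Char) : PySem.Chars.splitOn l [','] = splitC l := by
  rw [PySem.Chars.splitOn]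
  rw [splitOn_go_comma _ _ _ _ (Nat.le_succ _)]
  obtain ⟨h', t', ht⟩ := splitC_cons_exists l
  simp [ht, glueC]

-- ---- summing the digit chunks ----
def chunkVal (i : List Char) : Int :=
  if PySem.Chars.strIsdigit i then (PySem.Int.ofChars? i).getD 0 else 0

def valList (chunks : List (List Char)) : Int := (chunks.map chunkVal).sum

lemma chunkVal_digits (cur : List Char) (h : ∀ c ∈ cur, PySem.Chars.isdigit c = true) :
    chunkVal cur = hornerI cur := by
  cases cur with
  | nil => simp [chunkVal, PySem.Chars.strIsdigit, hornerI]
  | cons c t =>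
    have hsd : PySem.Chars.strIsdigit (c :: t) = true := by
      simp only [PySem.Chars.strIsdigit, List.isEmpty_cons, Bool.not_false, Bool.true_and]
      exact List.all_eq_true.mpr h
    rw [chunkVal, if_pos hsd, ofChars?_digits _ (List.cons_ne_nil c t) h]
    rfl

lemma valList_glue_splitC : ∀ (l cur : List Char), (∀ c ∈ cur, PySem.Chars.isdigit c = true) →
    valList (glueC cur (splitC (mapComma l))) = scanS l (hornerI cur) := by
  intro l
  induction l with
  | nil =>
    intro cur h
    simp only [mapComma, List.map_nil, splitC, glueC, List.append_nil, valList, List.map_cons,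
      List.map_nil, List.sum_cons, List.sum_nil, scanS, add_zero]
    exact chunkVal_digits cur h
  | cons c t ih =>
    intro cur h
    by_cases hd : PySem.Chars.isdigit c = true
    · have hcc : c ≠ ',' := digit_ne_comma hd
      simp only [mapComma] at ih ⊢
      simp only [List.map_cons, hd, if_true]
      rw [show splitC (c :: List.map (fun c => if PySem.Chars.isdigit c then c else ',') t)
          = glueC [c] (splitC (List.map (fun c => if PySem.Chars.isdigit c then c else ',') t))
          by simp [splitC, hcc]]
      rw [glueC_glueC]
      rw [ih (cur ++ [c]) (by
        intro x hx
        rcases List.mem_append.mp hx with hx | hx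
        · exact h x hx
        · rw [List.mem_singleton.mp hx]; exact hd)]
      rw [show scanS (c :: t) (hornerI cur)
          = scanS t (hornerI cur * 10 + ((c.toNat : Int) - 48)) by simp [scanS, hd]]
      congr 1
      simp [hornerI, List.foldl_append]
    · have hd' : PySem.Chars.isdigit c = false := by
        cases hh : PySem.Chars.isdigit c
        · rfl
        · exact absurd hh hd
      simp only [mapComma] at ih ⊢
      simp only [List.map_cons, hd', Bool.false_eq_true, if_false]
      rw [show splitC (',' :: List.map (fun c => if PySem.Chars.isdigit c then c else ',') t)
          = [] :: splitC (List.map (fun c => if PySem.Chars.isdigit c then c else ',') t)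
          by simp [splitC]]
      simp only [glueC, List.append_nil]
      have hX := ih [] (by intro x hx; cases hx)
      rw [glueC_nil _ (by
        obtain ⟨h', t', ht⟩ := splitC_cons_exists
          (List.map (fun c => if PySem.Chars.isdigit c then c else ',') t)
        simp [ht])] at hX
      rw [show valList ((cur : List Char)
            :: splitC (List.map (fun c => if PySem.Chars.isdigit c then c else ',') t))
          = chunkVal cur
            + valList (splitC (List.map (fun c => if PySem.Chars.isdigit c then c else ',') t))
          by simp [valList]]
      rw [hX, chunkVal_digits cur h]
      simp [scanS, hd', hornerI]

lemma sum_loop (chunks : List (List Char)) (ans : Int) :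
    chunks.foldl (fun answer i =>
      if PySem.Chars.strIsdigit i then answer + (PySem.Int.ofChars? i).getD 0 else answer) ans
    = ans + valList chunks := by
  induction chunks generalizing ans with
  | nil => simp [valList]
  | cons x xs ih =>
    simp only [List.foldl_cons, valList, List.map_cons, List.sum_cons]
    rw [ih]
    split
    · rename_i hsd
      simp only [chunkVal, hsd, if_true, valList]
      ring
    · rename_i hsd
      simp only [chunkVal, hsd, Bool.false_eq_true, if_false, valList]
      ring

-- ---- B's fold ----
lemma scanB (cs : List Char) : ∀ (t cur : Int),
    (cs.foldl
      (fun acc ch =>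
        if '0' ≤ ch ∧ ch ≤ '9' then (acc.1, acc.2 * 10 + ((ch.toNat : Int) - 48))
        else (acc.1 + acc.2, 0))
      (t, cur)).1
    + (cs.foldl
      (fun acc ch =>
        if '0' ≤ ch ∧ ch ≤ '9' then (acc.1, acc.2 * 10 + ((ch.toNat : Int) - 48))
        else (acc.1 + acc.2, 0))
      (t, cur)).2
    = t + scanS cs cur := by
  induction cs with
  | nil => intro t cur; simp [scanS]
  | cons c rest ih =>
    intro t cur
    by_cases hd : '0' ≤ c ∧ c ≤ '9'
    · have hdig : PySem.Chars.isdigit c = true := by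
        simp [PySem.Chars.isdigit, hd.1, hd.2]
      simp only [List.foldl_cons, hd, if_true, scanS, hdig]
      exact ih t (cur * 10 + ((c.toNat : Int) - 48))
    · have hdig : PySem.Chars.isdigit c = false := by
        simp only [PySem.Chars.isdigit, Bool.and_eq_false_iff, decide_eq_false_iff_not]
        by_cases h0 : '0' ≤ c
        · exact Or.inr (fun h9 => hd ⟨h0, h9⟩)
        · exact Or.inl h0
      simp only [List.foldl_cons, hd, if_false, scanS, hdig, Bool.false_eq_true]
      rw [ih (t + cur) 0]
      ring

-- ===== VERDICT (by name: the statement is the Claim_ definition above) =====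
theorem solution_spec : Claim_equal_solution := by
  intro s _
  unfold Spec_solution
  simp only [solution, solution_alt]
  rw [loop1, splitOn_comma, sum_loop, scanB]
  have h := valList_glue_splitC s.toList [] (by intro c hc; cases hc)
  rw [glueC_nil _ (by obtain ⟨h', t', ht⟩ := splitC_cons_exists (mapComma s.toList); simp [ht])] at h
  rw [h]
  simp [hornerI]
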